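-- pv_equiv track=rewrite | github.com/newrelic/newrelic-python-agent | license_reviewer.py | check_for_orphaned_libraries
-- ===== SOURCE A (Python) =====
-- def check_for_orphaned_libraries(license_info, license_source_map):
--     # checks for libraries that are no longer referenced by any source files
--
--     errors = []
--
--     # transpose the license_source_map file such that the key is the
--     # library name and the values are a list of source files
--     # we do this so we can easily do a check to see that all libraries
--     # in the libraries file are actually in use
--     source_files_by_library = {}
--     for source_file in license_source_map:
--         for library in license_source_map[source_file]["libraries"]:
--             if library not in source_files_by_library:
--                 source_files_by_library[library] = []
--
--             source_files_by_library[library].append(source_file)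
--
--     # check that all the libraries in our source file reference licenses that are also in our source file
--     for library in license_info["libraries"]:
--         if library not in source_files_by_library or len(source_files_by_library[library]) == 0:
--             errors.append(library)
--
--     return errors
-- ===== SOURCE B (Python) =====
-- def check_for_orphaned_libraries(license_info, license_source_map):
--     # brute force, no index: a library is orphaned iff no source file's
--     # library list mentions it; search the source map directly per library
--     errors = []
--     for library in license_info["libraries"]:
--         if not any(library in info["libraries"] for info in license_source_map.values()):
--             errors.append(library)
--     return errors
-- ===== Notes on version B (the rewrite author's own statement) =====
-- stated objective: alternative
-- what changed: Drops A's transposed library-to-source-files index entirely: B decides each declared library on the spot with a short-circuiting nested scan of the source files (any(...)), building no intermediate dict or set.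
import Mathlib
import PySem

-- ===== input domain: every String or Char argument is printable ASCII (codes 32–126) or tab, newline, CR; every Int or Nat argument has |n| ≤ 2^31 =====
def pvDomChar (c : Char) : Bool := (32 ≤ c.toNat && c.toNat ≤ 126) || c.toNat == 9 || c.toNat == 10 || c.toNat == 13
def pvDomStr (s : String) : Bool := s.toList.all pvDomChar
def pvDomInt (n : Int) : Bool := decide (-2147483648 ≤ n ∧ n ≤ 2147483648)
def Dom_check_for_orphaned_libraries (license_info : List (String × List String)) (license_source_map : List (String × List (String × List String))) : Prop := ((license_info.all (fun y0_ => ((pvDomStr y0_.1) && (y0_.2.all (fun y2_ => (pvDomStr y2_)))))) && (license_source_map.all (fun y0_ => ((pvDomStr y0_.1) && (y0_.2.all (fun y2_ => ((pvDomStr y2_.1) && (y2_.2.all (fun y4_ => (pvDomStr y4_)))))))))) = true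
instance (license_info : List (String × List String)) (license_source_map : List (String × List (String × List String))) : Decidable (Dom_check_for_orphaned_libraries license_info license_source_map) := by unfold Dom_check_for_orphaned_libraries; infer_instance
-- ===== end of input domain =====

-- B drops A's transposed library→source-files index and instead answers each declared
-- library with a direct nested scan of the source files; objective: alternative.

-- ===== PORT A =====
def check_for_orphaned_libraries (license_info : List (String × List String)) (license_source_map : List (String × List (String × List String))) : List String :=
  let errors : List String := []
  -- transpose: key = library, value = list of source files referencing it
  let source_files_by_library : PySem.Dict String (List String) :=
    license_source_map.foldl
      (fun d source_file =>
        (((PySem.Dict.mk source_file.2).get? "libraries").getD []).foldl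
          (fun d library => d.modify library [] (fun v => v ++ [source_file.1])) d)
      PySem.Dict.empty
  (((PySem.Dict.mk license_info).get? "libraries").getD []).foldl
    (fun errors library =>
      if !((source_files_by_library.get? library).isSome)
         || (source_files_by_library.getD library []).length == 0
      then errors ++ [library] else errors)
    errors

-- ===== PORT B =====
def check_for_orphaned_libraries_alt (license_info : List (String × List String)) (license_source_map : List (String × List (String × List String))) : List String :=
  (((PySem.Dict.mk license_info).get? "libraries").getD []).foldl
    (fun errors library =>
      if !(license_source_map.any
            (fun info => (((PySem.Dict.mk info.2).get? "libraries").getD []).contains library))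
      then errors ++ [library] else errors)
    []

-- ===== PRECONDITION & SPEC =====
-- Pre_ excludes exactly the KeyError inputs: the Python A raises when "libraries" is missing
-- from license_info or from any source-file entry of license_source_map.
def Pre_check_for_orphaned_libraries (license_info : List (String × List String)) (license_source_map : List (String × List (String × List String))) : Prop :=
  "libraries" ∈ license_info.map (·.1) ∧
  ∀ p ∈ license_source_map, "libraries" ∈ p.2.map (·.1)
instance (license_info : List (String × List String)) (license_source_map : List (String × List (String × List String))) : Decidable (Pre_check_for_orphaned_libraries license_info license_source_map) := by unfold Pre_check_for_orphaned_libraries; infer_instance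

def pvWitness_check_for_orphaned_libraries : (List (String × List String)) × (List (String × List (String × List String))) :=
  ([("libraries", ["x", "y", "z"])],
   [("f1.py", [("libraries", ["y", "w"])]), ("f2.py", [("libraries", ["w"])])])

def Spec_check_for_orphaned_libraries (license_info : List (String × List String)) (license_source_map : List (String × List (String × List String))) (out : List String) : Prop := out = check_for_orphaned_libraries_alt license_info license_source_map
instance (license_info : List (String × List String)) (license_source_map : List (String × List (String × List String))) (out : List String) : Decidable (Spec_check_for_orphaned_libraries license_info license_source_map out) := by unfold Spec_check_for_orphaned_libraries; infer_instance

-- ===== CLAIM (what is proved, stated in full; the proofs are below) =====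
def Claim_equal_check_for_orphaned_libraries : Prop := ∀ (license_info : List (String × List String)) (license_source_map : List (String × List (String × List String))), Dom_check_for_orphaned_libraries license_info license_source_map → Pre_check_for_orphaned_libraries license_info license_source_map → Spec_check_for_orphaned_libraries license_info license_source_map (check_for_orphaned_libraries license_info license_source_map)

-- ===== LEMMAS AND PROOFS =====

-- one source file's inner loop keeps every stored value nonempty
lemma inner_nonempty (libs : List String) (sf : String)
    (d : PySem.Dict String (List String))
    (hv : ∀ lib, d.contains lib = true → d.getD lib [] ≠ []) :
    ∀ lib, (libs.foldl (fun d library => d.modify library [] (fun v => v ++ [sf])) d).contains lib = true →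
      (libs.foldl (fun d library => d.modify library [] (fun v => v ++ [sf])) d).getD lib [] ≠ [] := by
  induction libs generalizing d with
  | nil => exact hv
  | cons x xs ih =>
      simp only [List.foldl_cons]
      refine ih _ ?_
      intro lib hc
      rw [PySem.Dict.getD_modify]
      split_ifs with h
      · simp
      · refine hv lib ?_
        rw [PySem.Dict.contains_modify] at hc
        simpa [h] using hc

-- one source file's inner loop: membership in the dict afterwards
lemma inner_contains (libs : List String) (sf : String)
    (d : PySem.Dict String (List String)) (lib : String) :
    (libs.foldl (fun d library => d.modify library [] (fun v => v ++ [sf])) d).contains lib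
      = (d.contains lib || libs.contains lib) := by
  induction libs generalizing d with
  | nil => simp
  | cons x xs ih =>
      simp only [List.foldl_cons, ih, PySem.Dict.contains_modify, List.contains_cons]
      by_cases h : (lib == x) = true <;> simp [h, Bool.or_comm]

-- the transposed dict contains a library iff some source file references it
lemma transpose_contains (lsm : List (String × List (String × List String)))
    (d : PySem.Dict String (List String)) (lib : String) :
    (lsm.foldl (fun d source_file =>
        (((PySem.Dict.mk source_file.2).get? "libraries").getD []).foldl
          (fun d library => d.modify library [] (fun v => v ++ [source_file.1])) d) d).contains lib
      = (d.contains lib ||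
         lsm.any (fun info => (((PySem.Dict.mk info.2).get? "libraries").getD []).contains lib)) := by
  induction lsm generalizing d with
  | nil => simp
  | cons p rest ih =>
      simp only [List.foldl_cons, List.any_cons, ih, inner_contains, Bool.or_assoc]

-- all values stored by the transpose loop are nonempty
lemma transpose_nonempty (lsm : List (String × List (String × List String)))
    (d : PySem.Dict String (List String))
    (hv : ∀ lib, d.contains lib = true → d.getD lib [] ≠ []) :
    ∀ lib, (lsm.foldl (fun d source_file =>
        (((PySem.Dict.mk source_file.2).get? "libraries").getD []).foldl
          (fun d library => d.modify library [] (fun v => v ++ [source_file.1])) d) d).contains lib = true →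
      (lsm.foldl (fun d source_file =>
        (((PySem.Dict.mk source_file.2).get? "libraries").getD []).foldl
          (fun d library => d.modify library [] (fun v => v ++ [source_file.1])) d) d).getD lib [] ≠ [] := by
  induction lsm generalizing d with
  | nil => exact hv
  | cons p rest ih =>
      simp only [List.foldl_cons]
      exact ih _ (inner_nonempty _ _ _ hv)

theorem check_for_orphaned_libraries_spec : Claim_equal_check_for_orphaned_libraries := by
  intro license_info license_source_map _ _
  unfold Spec_check_for_orphaned_libraries check_for_orphaned_libraries check_for_orphaned_libraries_alt
  simp only []
  rw [PySem.List.foldl_append_if_eq_filter, PySem.List.foldl_append_if_eq_filter]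
  simp only [List.nil_append]
  apply List.filter_congr
  intro lib _
  set D := license_source_map.foldl (fun d source_file =>
        (((PySem.Dict.mk source_file.2).get? "libraries").getD []).foldl
          (fun d library => d.modify library [] (fun v => v ++ [source_file.1])) d) PySem.Dict.empty with hD
  have hc : D.contains lib
      = license_source_map.any (fun info => (((PySem.Dict.mk info.2).get? "libraries").getD []).contains lib) := by
    rw [hD, transpose_contains]; simp
  rw [← hc]
  by_cases h : D.contains lib = true
  · have h1 : (D.get? lib).isSome = true := by
      rw [← PySem.Dict.contains_eq_isSome_get?]; exact h
    have h2 : D.getD lib [] ≠ [] :=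
      transpose_nonempty license_source_map PySem.Dict.empty (by simp) lib h
    have hL : ((D.getD lib []).length == 0) = false := by
      simpa [List.length_eq_zero_iff] using h2
    rw [h1, hL, h]; rfl
  · have h1 : (D.get? lib).isSome = false := by
      rw [← PySem.Dict.contains_eq_isSome_get?]; simpa using h
    simp only [Bool.not_eq_true] at h
    rw [h1, h]; rfl
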